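-- pv_equiv track=rewrite | github.com/ParthivNaresh/lifearchivist | lifearchivist/tools/file_import/file_import_utils.py | is_text_extraction_supported
-- ===== SOURCE A (Python) =====
-- SUPPORTED_TEXT_EXTRACTION_TYPES = [
--     "text/",  # All text/* types (includes text/csv)
--     "application/pdf",  # PDF documents
--     "application/vnd.openxmlformats-officedocument.wordprocessingml.document",  # Word documents
--     "application/vnd.openxmlformats-officedocument.spreadsheetml.sheet",  # Excel .xlsx
--     "application/vnd.ms-excel",  # Excel .xls
--     "application/excel",  # Alternative Excel MIME type
--     "application/x-excel",  # Alternative Excel MIME type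
--     "application/x-msexcel",  # Alternative Excel MIME type
--     "image/",  # All image/* types for OCR extraction
-- ]
--
-- def is_text_extraction_supported(mime_type: str) -> bool:
--     """
--     Check if a file type supports text extraction.
--
--     Args:
--         mime_type: MIME type to check
--
--     Returns:
--         True if text extraction is supported for this type
--     """
--     return any(
--         (
--             mime_type.startswith(file_type)
--             if file_type.endswith("/")
--             else mime_type == file_type
--         )
--         for file_type in SUPPORTED_TEXT_EXTRACTION_TYPES
--     )
-- ===== SOURCE B (Python) =====
-- _APPLICATION_SUBTYPES = frozenset({
--     "pdf",
--     "vnd.openxmlformats-officedocument.wordprocessingml.document",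
--     "vnd.openxmlformats-officedocument.spreadsheetml.sheet",
--     "vnd.ms-excel",
--     "excel",
--     "x-excel",
--     "x-msexcel",
-- })
--
-- def is_text_extraction_supported(mime_type: str) -> bool:
--     """Parse the MIME type into major type and subtype, then dispatch on the major type."""
--     major, sep, subtype = mime_type.partition("/")
--     if not sep:
--         return False
--     if major in ("text", "image"):
--         return True
--     return major == "application" and subtype in _APPLICATION_SUBTYPES
-- ===== Notes on version B (the rewrite author's own statement) =====
-- stated objective: alternative
-- what changed: Instead of scanning A's mixed pattern list and classifying each entry per-iteration as prefix or exact match, B parses the MIME type once into major type and subtype at the first '/' (str.partition) and dispatches on the major type: text/image are accepted outright, application is accepted iff the subtype is in a fixed set, everything else (including slashless strings) is rejected.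
import Mathlib
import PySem

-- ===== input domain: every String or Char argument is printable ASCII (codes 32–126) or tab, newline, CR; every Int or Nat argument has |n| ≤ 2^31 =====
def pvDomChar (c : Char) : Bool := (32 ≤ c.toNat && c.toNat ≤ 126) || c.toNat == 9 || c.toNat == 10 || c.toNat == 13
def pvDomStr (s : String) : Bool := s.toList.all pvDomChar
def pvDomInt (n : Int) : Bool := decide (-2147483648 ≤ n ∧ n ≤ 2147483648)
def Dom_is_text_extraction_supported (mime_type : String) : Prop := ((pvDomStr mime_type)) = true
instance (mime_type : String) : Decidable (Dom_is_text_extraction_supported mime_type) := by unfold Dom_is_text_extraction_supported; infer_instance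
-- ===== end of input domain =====

-- B parses the MIME type into major type and subtype at the first '/' (str.partition)
-- and dispatches on the major type, instead of A's scan of a mixed pattern list
-- (objective: simpler).

-- ===== PORT A =====
def SUPPORTED_TEXT_EXTRACTION_TYPES : List String :=
  ["text/", "application/pdf",
   "application/vnd.openxmlformats-officedocument.wordprocessingml.document",
   "application/vnd.openxmlformats-officedocument.spreadsheetml.sheet",
   "application/vnd.ms-excel", "application/excel", "application/x-excel",
   "application/x-msexcel", "image/"]

def is_text_extraction_supported (mime_type : String) : Bool :=
  SUPPORTED_TEXT_EXTRACTION_TYPES.any (fun file_type =>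
    if PySem.Str.endswith file_type "/" then PySem.Str.startswith mime_type file_type
    else mime_type == file_type)

-- ===== PORT B =====
-- hand port of `major, sep, subtype = mime_type.partition("/")` for a one-character
-- separator: exact — `none` ↔ '/' absent (Python's empty sep), otherwise the parts
-- before and after the FIRST '/'
def pvPartitionSlash : List Char → Option (List Char × List Char)
  | [] => none
  | c :: cs =>
    if c = '/' then some ([], cs)
    else
      match pvPartitionSlash cs with
      | none => none
      | some (h, t) => some (c :: h, t)

-- _APPLICATION_SUBTYPES (all distinct, so the frozenset is this list)
def pvAppSubtypes : PySem.Set String :=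
  PySem.Set.ofList
    ["pdf",
     "vnd.openxmlformats-officedocument.wordprocessingml.document",
     "vnd.openxmlformats-officedocument.spreadsheetml.sheet",
     "vnd.ms-excel", "excel", "x-excel", "x-msexcel"]

def is_text_extraction_supported_alt (mime_type : String) : Bool :=
  match pvPartitionSlash mime_type.toList with
  | none => false          -- no '/': sep empty → False
  | some (major, subtype) =>
    if major == "text".toList || major == "image".toList then true
    else major == "application".toList && pvAppSubtypes.contains (String.ofList subtype)

-- ===== PRECONDITION & SPEC =====
def Spec_is_text_extraction_supported (mime_type : String) (out : Bool) : Prop := out = is_text_extraction_supported_alt mime_type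
instance (mime_type : String) (out : Bool) : Decidable (Spec_is_text_extraction_supported mime_type out) := by unfold Spec_is_text_extraction_supported; infer_instance

-- ===== CLAIM =====
def Claim_equal_is_text_extraction_supported : Prop := ∀ (mime_type : String), Dom_is_text_extraction_supported mime_type → Spec_is_text_extraction_supported mime_type (is_text_extraction_supported mime_type)

-- ===== LEMMAS AND PROOFS =====

-- partition = none ↔ no slash
theorem pvPartitionSlash_none {l : List Char} (h : pvPartitionSlash l = none) : '/' ∉ l := by
  induction l with
  | nil => simp
  | cons c cs ih =>
    unfold pvPartitionSlash at h
    by_cases hc : c = '/'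
    · simp [hc] at h
    · simp only [if_neg hc] at h
      cases hp : pvPartitionSlash cs with
      | none =>
        intro hm
        rcases List.mem_cons.mp hm with h' | h'
        · exact hc h'.symm
        · exact ih hp h'
      | some p => rw [hp] at h; cases p; simp at h

-- partition = some (h, t) → the input is h ++ '/' :: t with no slash in h
theorem pvPartitionSlash_some {l h₁ t : List Char}
    (h : pvPartitionSlash l = some (h₁, t)) : l = h₁ ++ '/' :: t ∧ '/' ∉ h₁ := by
  induction l generalizing h₁ with
  | nil => simp [pvPartitionSlash] at h
  | cons c cs ih =>
    unfold pvPartitionSlash at h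
    by_cases hc : c = '/'
    · simp only [if_pos hc, Option.some.injEq, Prod.mk.injEq] at h
      obtain ⟨h1, h2⟩ := h
      subst h1; subst h2
      simp [hc]
    · simp only [if_neg hc] at h
      cases hp : pvPartitionSlash cs with
      | none => rw [hp] at h; simp at h
      | some p =>
        obtain ⟨ph, pt⟩ := p
        rw [hp] at h
        simp only [Option.some.injEq, Prod.mk.injEq] at h
        obtain ⟨h1, h2⟩ := h
        subst h1; subst h2
        obtain ⟨hl, hn⟩ := ih hp
        refine ⟨by simp [hl], ?_⟩
        intro hm
        rcases List.mem_cons.mp hm with h' | h'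
        · exact hc h'.symm
        · exact hn h'

-- a first-slash decomposition is unique
theorem pvSlashSplit_unique {p q a b : List Char} (hp : '/' ∉ p) (hq : '/' ∉ q)
    (h : p ++ '/' :: a = q ++ '/' :: b) : p = q ∧ a = b := by
  induction p generalizing q with
  | nil =>
    cases q with
    | nil => simpa using h
    | cons d q =>
      simp only [List.nil_append, List.cons_append, List.cons.injEq] at h
      exact absurd (by simp [← h.1]) hq
  | cons c p ih =>
    cases q with
    | nil =>
      simp only [List.cons_append, List.nil_append, List.cons.injEq] at h
      exact absurd (by simp [h.1]) hp
    | cons d q =>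
      simp only [List.cons_append, List.cons.injEq] at h
      have hp' : '/' ∉ p := fun hh => hp (List.mem_cons_of_mem _ hh)
      have hq' : '/' ∉ q := fun hh => hq (List.mem_cons_of_mem _ hh)
      obtain ⟨h1, h2⟩ := ih hp' hq' h.2
      exact ⟨by rw [h.1, h1], h2⟩

-- startswith a no-slash-prefix-plus-'/' pattern picks out the major type
theorem pvStartswith_major {p h₁ t : List Char} (hp : '/' ∉ p) (hh : '/' ∉ h₁) :
    PySem.Chars.startswith (h₁ ++ '/' :: t) (p ++ ['/']) = decide (h₁ = p) := by
  by_cases he : h₁ = p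
  · subst he
    have hs := (PySem.Chars.startswith_iff (h₁ ++ '/' :: t) (h₁ ++ ['/'])).mpr ⟨t, by simp⟩
    simp [hs]
  · simp only [decide_eq_false he, ← Bool.not_eq_true]
    rw [PySem.Chars.startswith_iff]
    rintro ⟨r, hr⟩
    rw [List.append_assoc] at hr
    exact he ((pvSlashSplit_unique hh hp hr.symm).1)

-- string equality with a literal, through toList
theorem pvBeq_toList (m s : String) : (m == s) = decide (m.toList = s.toList) := by
  cases h : m == s
  · simp only [beq_eq_false_iff_ne, ne_eq] at h
    simp [show (m.toList = s.toList) ↔ (m = s) from String.toList_inj, h]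
  · rw [beq_iff_eq] at h; subst h; simp

-- equality with a slash-containing literal picks out major and subtype
theorem pvEq_major_sub {h₁ t p a : List Char} (hh : '/' ∉ h₁) (hp : '/' ∉ p) :
    decide (h₁ ++ '/' :: t = p ++ '/' :: a) = (decide (h₁ = p) && decide (t = a)) := by
  by_cases he : h₁ = p ∧ t = a
  · obtain ⟨rfl, rfl⟩ := he; simp
  · have : ¬ (h₁ ++ '/' :: t = p ++ '/' :: a) := fun hc => he (pvSlashSplit_unique hh hp hc)
    rcases Decidable.not_and_iff_not_or_not.mp he with h' | h' <;> simp_all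

-- the common boolean shape of the two sides once every test is a `decide`
theorem pvBoolShape (a b i c1 c2 c3 c4 c5 c6 c7 : Bool) :
    (a || (b && c1 || (b && c2 || (b && c3 || (b && c4 || (b && c5 || (b && c6 || (b && c7 || i)))))))) =
    (if a || i then true else b && (c1 || (c2 || (c3 || (c4 || (c5 || (c6 || c7))))))) := by
  cases a <;> cases b <;> cases i <;> simp

-- ===== VERDICT =====
theorem is_text_extraction_supported_spec : Claim_equal_is_text_extraction_supported := by
  intro m _
  unfold Spec_is_text_extraction_supported is_text_extraction_supported
    is_text_extraction_supported_alt SUPPORTED_TEXT_EXTRACTION_TYPES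
  simp only [List.any_cons, List.any_nil,
    if_pos (show PySem.Str.endswith "text/" "/" = true from by decide),
    if_pos (show PySem.Str.endswith "image/" "/" = true from by decide),
    if_neg (show ¬ PySem.Str.endswith "application/pdf" "/" = true from by decide),
    if_neg (show ¬ PySem.Str.endswith "application/vnd.openxmlformats-officedocument.wordprocessingml.document" "/" = true from by decide),
    if_neg (show ¬ PySem.Str.endswith "application/vnd.openxmlformats-officedocument.spreadsheetml.sheet" "/" = true from by decide),
    if_neg (show ¬ PySem.Str.endswith "application/vnd.ms-excel" "/" = true from by decide),
    if_neg (show ¬ PySem.Str.endswith "application/excel" "/" = true from by decide),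
    if_neg (show ¬ PySem.Str.endswith "application/x-excel" "/" = true from by decide),
    if_neg (show ¬ PySem.Str.endswith "application/x-msexcel" "/" = true from by decide)]
  cases hp : pvPartitionSlash m.toList with
  | none =>
    have hns : '/' ∉ m.toList := pvPartitionSlash_none hp
    have hsw : ∀ s : String, '/' ∈ s.toList → (m == s) = false := by
      intro s hs
      rw [pvBeq_toList]
      exact decide_eq_false (fun hc => hns (hc ▸ hs))
    have hst : ∀ p : List Char, PySem.Chars.startswith m.toList (p ++ ['/']) = false := by
      intro p
      rw [← Bool.not_eq_true, PySem.Chars.startswith_iff]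
      rintro ⟨r, hr⟩
      exact hns (by rw [← hr]; simp)
    simp only [PySem.Str.startswith_eq,
      show ("text/".toList = "text".toList ++ ['/']) from by decide,
      show ("image/".toList = "image".toList ++ ['/']) from by decide,
      hst, hsw "application/pdf" (by decide),
      hsw "application/vnd.openxmlformats-officedocument.wordprocessingml.document" (by decide),
      hsw "application/vnd.openxmlformats-officedocument.spreadsheetml.sheet" (by decide),
      hsw "application/vnd.ms-excel" (by decide), hsw "application/excel" (by decide),
      hsw "application/x-excel" (by decide), hsw "application/x-msexcel" (by decide),
      Bool.or_false]
  | some p =>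
    obtain ⟨h₁, t⟩ := p
    obtain ⟨hl, hns⟩ := pvPartitionSlash_some hp
    have heq : ∀ s : String, ∀ q a : List Char, s.toList = q ++ '/' :: a → '/' ∉ q →
        (m == s) = (decide (h₁ = q) && decide (t = a)) := by
      intro s q a hs hq
      rw [pvBeq_toList, hs, hl, pvEq_major_sub hns hq]
    have hsw : ∀ q : List Char, '/' ∉ q →
        PySem.Chars.startswith m.toList (q ++ ['/']) = decide (h₁ = q) := by
      intro q hq; rw [hl]; exact pvStartswith_major hq hns
    simp only [PySem.Str.startswith_eq,
      show ("text/".toList = "text".toList ++ ['/']) from by decide,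
      show ("image/".toList = "image".toList ++ ['/']) from by decide,
      hsw "text".toList (by decide), hsw "image".toList (by decide),
      heq "application/pdf" "application".toList "pdf".toList (by decide) (by decide),
      heq "application/vnd.openxmlformats-officedocument.wordprocessingml.document"
        "application".toList
        "vnd.openxmlformats-officedocument.wordprocessingml.document".toList (by decide) (by decide),
      heq "application/vnd.openxmlformats-officedocument.spreadsheetml.sheet"
        "application".toList
        "vnd.openxmlformats-officedocument.spreadsheetml.sheet".toList (by decide) (by decide),
      heq "application/vnd.ms-excel" "application".toList "vnd.ms-excel".toList (by decide) (by decide),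
      heq "application/excel" "application".toList "excel".toList (by decide) (by decide),
      heq "application/x-excel" "application".toList "x-excel".toList (by decide) (by decide),
      heq "application/x-msexcel" "application".toList "x-msexcel".toList (by decide) (by decide)]
    have hofl : ∀ s : String, (String.ofList t == s) = decide (t = s.toList) := by
      intro s; rw [pvBeq_toList]; simp
    have hbeq : ∀ l : List Char, (h₁ == l) = decide (h₁ = l) := fun l => beq_eq_decide h₁ l
    rw [show pvAppSubtypes =
        ["pdf",
         "vnd.openxmlformats-officedocument.wordprocessingml.document",
         "vnd.openxmlformats-officedocument.spreadsheetml.sheet",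
         "vnd.ms-excel", "excel", "x-excel", "x-msexcel"] from by decide]
    simp only [PySem.Set.contains, List.contains_cons, List.contains_nil, hofl, hbeq,
      Bool.or_false]
    exact pvBoolShape _ _ _ _ _ _ _ _ _ _
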